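-- pv_equiv track=rewrite | github.com/zongwave/pixelcraft | tools/analyze_paddle_memory.py | sample_transformer_events
-- ===== SOURCE A (Python) =====
-- def sample_transformer_events(transformer_events, interval=32):
--     if not transformer_events:
--         return []
--
--     relevant_events = [event for event in transformer_events if event[1] in ["init kv cache", "cal atten", "new token"]]
--     sampled_events = []
--
--     first_cal_atten = None
--     first_gen_new_token = None
--
--     for event in relevant_events:
--         if event[1] == "init kv cache":
--             sampled_events.append(event)
--         elif event[1] == "cal atten" and first_cal_atten is None:
--             first_cal_atten = event
--             sampled_events.append(event)
--         elif event[1] == "new token" and first_gen_new_token is None: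
--             first_gen_new_token = event
--             sampled_events.append(event)
--         else:
--             if event[1] == "new token":
--                 sampled_events.append(event)
--
--     gen_new_token_events = [event for event in relevant_events if event[1] == "new token"]
--     if gen_new_token_events:
--         sampled_gen_new_token = [gen_new_token_events[0]]
--         remaining_gen_new_token = gen_new_token_events[1:]
--         sampled_remaining = remaining_gen_new_token[::interval] if remaining_gen_new_token else []
--         sampled_gen_new_token.extend(sampled_remaining)
--         sampled_events = [event for event in sampled_events if event[1] != "new token"]
--         sampled_events.extend(sampled_gen_new_token)
--
--     return sorted(sampled_events, key=lambda x: x[0])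
-- ===== SOURCE B (Python) =====
-- def sample_transformer_events(transformer_events, interval=32):
--     kept = []
--     new_sel = []
--     seen_cal = False
--     ntok = 0
--     for e in transformer_events:
--         tag = e[1]
--         if tag == "init kv cache":
--             kept.append(e)
--         elif tag == "cal atten":
--             if not seen_cal:
--                 seen_cal = True
--                 kept.append(e)
--         elif tag == "new token":
--             if ntok == 0 or (ntok - 1) % interval == 0:
--                 new_sel.append(e)
--             ntok += 1
--     return sorted(kept + new_sel, key=lambda x: x[0])
-- ===== Notes on version B (the rewrite author's own statement) =====
-- stated objective: alternative
-- what changed: Replaces A's staged passes (relevance filter, flagged loop that appends every new-token event, a second filter for new tokens, slicing, a post-filter that removes the new tokens again, extend) by a single pass over the input with two accumulators and a counter that subsamples new-token events by divisibility ((ntok-1) % interval == 0), followed by the same stable sort.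
-- outside the precondition, e.g. on sample_transformer_events([['a', 'new token'], ['b', 'new token']], 0): A raises ValueError, B raises ZeroDivisionError
import Mathlib
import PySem

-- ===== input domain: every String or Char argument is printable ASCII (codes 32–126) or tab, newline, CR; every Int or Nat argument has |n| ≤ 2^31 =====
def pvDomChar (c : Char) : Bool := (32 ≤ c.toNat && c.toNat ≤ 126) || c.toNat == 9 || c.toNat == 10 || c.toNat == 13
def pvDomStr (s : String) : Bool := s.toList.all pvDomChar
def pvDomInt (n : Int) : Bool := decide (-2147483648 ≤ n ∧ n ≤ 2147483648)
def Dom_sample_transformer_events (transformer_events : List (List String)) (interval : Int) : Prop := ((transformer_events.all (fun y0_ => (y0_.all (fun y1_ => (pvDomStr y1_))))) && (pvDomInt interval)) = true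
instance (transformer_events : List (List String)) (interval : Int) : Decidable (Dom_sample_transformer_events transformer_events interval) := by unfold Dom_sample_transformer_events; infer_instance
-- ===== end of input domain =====

-- B replaces A's staged passes (filter, flagged loop that appends and then re-filters new
-- tokens, a second filter, slicing, extend) by ONE pass with two accumulators and a counter
-- that subsamples new-token events by divisibility; return value only, no argument is mutated.

-- ===== PORT A =====
-- shared accessors: event[1] / event[0]; Pre_ guarantees the index is in range,
-- so the "" default of getD is never used on admitted inputs
def pvTag (e : List String) : String := (PySem.List.pyGet? e 1).getD ""
def pvKey0 (e : List String) : String := (PySem.List.pyGet? e 0).getD ""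

def pvRelevant (e : List String) : Bool :=
  pvTag e == "init kv cache" || pvTag e == "cal atten" || pvTag e == "new token"

-- one iteration of A's for-loop over (sampled_events, first_cal_atten, first_gen_new_token)
def pvStepA (st : List (List String) × Option (List String) × Option (List String))
    (e : List String) : List (List String) × Option (List String) × Option (List String) :=
  if pvTag e == "init kv cache" then (st.1 ++ [e], st.2.1, st.2.2)
  else if pvTag e == "cal atten" && st.2.1.isNone then (st.1 ++ [e], some e, st.2.2)
  else if pvTag e == "new token" && st.2.2.isNone then (st.1 ++ [e], st.2.1, some e)
  else if pvTag e == "new token" then (st.1 ++ [e], st.2.1, st.2.2)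
  else st

def sample_transformer_events (transformer_events : List (List String)) (interval : Int) : List (List String) :=
  if transformer_events.isEmpty then []
  else
    let relevant := transformer_events.filter pvRelevant
    let sampled := (relevant.foldl pvStepA ([], none, none)).1
    let gen_new_token := relevant.filter (fun e => pvTag e == "new token")
    let sampled2 :=
      match gen_new_token with
      | [] => sampled
      | g0 :: grest =>
        -- remaining[::interval] if remaining else []; slice? is none only for step 0 (Python: ValueError, outside Pre_)
        let sampled_remaining :=
          if grest.isEmpty then [] else (PySem.List.slice? grest none none interval).getD []
        (sampled.filter (fun e => !(pvTag e == "new token"))) ++ (g0 :: sampled_remaining)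
    PySem.List.sorted sampled2 pvKey0 false

-- ===== PORT B =====
-- one iteration of B's single loop over (kept, new_sel, seen_cal, ntok);
-- PySem.Int.mod is Python's %, evaluated (as in B) only with ntok ≥ 1 (interval = 0 then raises, outside Pre_)
def pvStepB (interval : Int)
    (st : List (List String) × List (List String) × Bool × Int) (e : List String) :
    List (List String) × List (List String) × Bool × Int :=
  if pvTag e == "init kv cache" then (st.1 ++ [e], st.2.1, st.2.2.1, st.2.2.2)
  else if pvTag e == "cal atten" then
    (if !st.2.2.1 then (st.1 ++ [e], st.2.1, true, st.2.2.2) else st)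
  else if pvTag e == "new token" then
    (st.1,
     (if st.2.2.2 == 0 || PySem.Int.mod (st.2.2.2 - 1) interval == 0
      then st.2.1 ++ [e] else st.2.1),
     st.2.2.1, st.2.2.2 + 1)
  else st

def sample_transformer_events_alt (transformer_events : List (List String)) (interval : Int) : List (List String) :=
  let st := transformer_events.foldl (pvStepB interval) ([], [], false, 0)
  PySem.List.sorted (st.1 ++ st.2.1) pvKey0 false

-- ===== PRECONDITION & SPEC =====
-- Pre_ excludes events shorter than 2 entries (A's event[1] raises IndexError) and, when at
-- least two new-token events occur, non-positive intervals: interval = 0 raises ValueError in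
-- A (ZeroDivisionError in B), and a negative interval makes A's [::interval] reverse-sample
-- from the END of the list — an accident of the slicing idiom, a corner no caller specifies —
-- while B forward-samples by divisibility.
def Pre_sample_transformer_events (transformer_events : List (List String)) (interval : Int) : Prop :=
  (∀ e ∈ transformer_events, 2 ≤ e.length) ∧
  (2 ≤ (transformer_events.filter (fun e => pvTag e == "new token")).length → 1 ≤ interval)
instance (transformer_events : List (List String)) (interval : Int) : Decidable (Pre_sample_transformer_events transformer_events interval) := by unfold Pre_sample_transformer_events; infer_instance

def pvWitness_sample_transformer_events : List (List String) × Int :=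
  ([["a", "init kv cache"], ["b", "new token"], ["c", "cal atten"], ["d", "new token"]], 2)

def Spec_sample_transformer_events (transformer_events : List (List String)) (interval : Int) (out : List (List String)) : Prop := out = sample_transformer_events_alt transformer_events interval
instance (transformer_events : List (List String)) (interval : Int) (out : List (List String)) : Decidable (Spec_sample_transformer_events transformer_events interval out) := by unfold Spec_sample_transformer_events; infer_instance

-- ===== CLAIM (what is proved, stated in full; the proofs are below) =====
def Claim_equal_sample_transformer_events : Prop := ∀ (transformer_events : List (List String)) (interval : Int), Dom_sample_transformer_events transformer_events interval → Pre_sample_transformer_events transformer_events interval → Spec_sample_transformer_events transformer_events interval (sample_transformer_events transformer_events interval)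

-- ===== LEMMAS AND PROOFS =====

def pvIsNew (e : List String) : Bool := pvTag e == "new token"

-- the kept non-new-token events: every 'init kv cache' plus the first 'cal atten' (flag s)
def pvKeptF : List (List String) → Bool → List (List String)
  | [], _ => []
  | e :: t, s =>
    if pvTag e == "init kv cache" then e :: pvKeptF t s
    else if pvTag e == "cal atten" && !s then e :: pvKeptF t true
    else pvKeptF t s

-- B's counter-selection of a new-token list, counter c
def pvSelSpec (interval : Int) : Int → List (List String) → List (List String)
  | _, [] => []
  | c, e :: t =>
    if c == 0 || PySem.Int.mod (c - 1) interval == 0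
    then e :: pvSelSpec interval (c + 1) t
    else pvSelSpec interval (c + 1) t

-- countdown form: pick when the countdown reaches 0, then restart at k-1
def pvPickMod (k : Nat) : Nat → List (List String) → List (List String)
  | _, [] => []
  | 0, e :: t => e :: pvPickMod k (k - 1) t
  | r + 1, _ :: t => pvPickMod k r t

-- drop form: head, then every k-th element
def pvEveryK (k : Nat) : List (List String) → List (List String)
  | [] => []
  | e :: t => e :: pvEveryK k (t.drop (k - 1))
termination_by l => l.length
decreasing_by simp

theorem pv_b_fold (interval : Int) (l : List (List String))
    (K N : List (List String)) (s : Bool) (c : Int) :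
    (l.foldl (pvStepB interval) (K, N, s, c)).1 = K ++ pvKeptF l s ∧
    (l.foldl (pvStepB interval) (K, N, s, c)).2.1
      = N ++ pvSelSpec interval c (l.filter pvIsNew) := by
  induction l generalizing K N s c with
  | nil => simp [pvSelSpec, pvKeptF]
  | cons e t ih =>
    rw [List.foldl_cons]
    by_cases h1 : pvTag e == "init kv cache"
    · have hn : pvIsNew e = false := by
        simp [pvIsNew]; simp at h1; simp [h1]
      have hB : pvStepB interval (K, N, s, c) e = (K ++ [e], N, s, c) := by
        simp [pvStepB, h1]
      rw [hB]
      rcases ih (K ++ [e]) N s c with ⟨ha, hb⟩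
      refine ⟨?_, ?_⟩
      · rw [ha, pvKeptF]; simp [h1]
      · rw [hb]; simp [List.filter_cons, hn]
    · by_cases h2 : pvTag e == "cal atten"
      · have hn : pvIsNew e = false := by
          simp [pvIsNew]; simp at h2; simp [h2]
        cases s with
        | false =>
          have hB : pvStepB interval (K, N, false, c) e = (K ++ [e], N, true, c) := by
            simp [pvStepB, h1, h2]
          rw [hB]
          rcases ih (K ++ [e]) N true c with ⟨ha, hb⟩
          refine ⟨?_, ?_⟩
          · rw [ha, pvKeptF]; simp [h1, h2]
          · rw [hb]; simp [List.filter_cons, hn]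
        | true =>
          have hB : pvStepB interval (K, N, true, c) e = (K, N, true, c) := by
            simp [pvStepB, h1, h2]
          rw [hB]
          rcases ih K N true c with ⟨ha, hb⟩
          refine ⟨?_, ?_⟩
          · rw [ha, pvKeptF]; simp [h1, h2]
          · rw [hb]; simp [List.filter_cons, hn]
      · by_cases h3 : pvTag e == "new token"
        · have hn : pvIsNew e = true := by simpa [pvIsNew] using h3
          have hB : pvStepB interval (K, N, s, c) e
              = (K, (if c == 0 || PySem.Int.mod (c - 1) interval == 0 then N ++ [e] else N), s, c + 1) := by
            simp [pvStepB, h1, h2, h3]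
          rw [hB]
          rcases ih K (if c == 0 || PySem.Int.mod (c - 1) interval == 0 then N ++ [e] else N) s (c + 1) with ⟨ha, hb⟩
          refine ⟨?_, ?_⟩
          · rw [ha, pvKeptF]; simp [h1, h2]
          · rw [hb]; simp only [List.filter_cons, hn, if_pos, pvSelSpec]
            by_cases hc : c == 0 || PySem.Int.mod (c - 1) interval == 0 <;> simp [hc]
        · have hn : pvIsNew e = false := by simpa [pvIsNew] using h3
          have hB : pvStepB interval (K, N, s, c) e = (K, N, s, c) := by
            simp [pvStepB, h1, h2, h3]
          rw [hB]
          rcases ih K N s c with ⟨ha, hb⟩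
          refine ⟨?_, ?_⟩
          · rw [ha, pvKeptF]; simp [h1, h2]
          · rw [hb]; simp [List.filter_cons, hn]

theorem pv_a_fold (l : List (List String))
    (accA : List (List String)) (fca fgn : Option (List String)) :
    ((l.filter pvRelevant).foldl pvStepA (accA, fca, fgn)).1.filter (fun e => !(pvTag e == "new token"))
      = accA.filter (fun e => !(pvTag e == "new token")) ++ pvKeptF l fca.isSome := by
  induction l generalizing accA fca fgn with
  | nil => simp [pvKeptF]
  | cons e t ih =>
    by_cases hr : pvRelevant e
    · rw [List.filter_cons_of_pos hr, List.foldl_cons]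
      by_cases h1 : pvTag e == "init kv cache"
      · have hA : pvStepA (accA, fca, fgn) e = (accA ++ [e], fca, fgn) := by
          simp [pvStepA]; simp at h1; simp [h1]
        rw [hA, ih, pvKeptF]
        simp at h1
        simp [List.filter_append, h1]
      · by_cases h2 : pvTag e == "cal atten"
        · cases fca with
          | none =>
            have hA : pvStepA (accA, none, fgn) e = (accA ++ [e], some e, fgn) := by
              simp [pvStepA]; simp at h1 h2; simp [h1, h2]
            rw [hA, ih, pvKeptF]
            simp at h1 h2
            simp [List.filter_append, h1, h2]
          | some cc =>
            have hA : pvStepA (accA, some cc, fgn) e = (accA, some cc, fgn) := by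
              simp [pvStepA]; simp at h1 h2; simp [h1, h2]
            rw [hA, ih, pvKeptF]
            simp at h1 h2
            simp [h1, h2]
        · by_cases h3 : pvTag e == "new token"
          · have hA : pvStepA (accA, fca, fgn) e
                = (accA ++ [e], fca, (pvStepA (accA, fca, fgn) e).2.2) := by
              simp at h1 h2 h3
              cases fgn <;> simp [pvStepA, h1, h2, h3]
            rw [hA, ih, pvKeptF]
            simp at h1 h2 h3
            simp [List.filter_append, h1, h2, h3]
          · exfalso
            simp [pvRelevant, h1, h2, h3] at hr
    · rw [List.filter_cons_of_neg hr]
      rw [ih, pvKeptF]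
      simp [pvRelevant] at hr
      simp [hr]

theorem pv_a_fold_no_new (l : List (List String))
    (hl : ∀ e ∈ l, ¬ pvIsNew e = true)
    (accA : List (List String)) (fca fgn : Option (List String)) :
    ((l.filter pvRelevant).foldl pvStepA (accA, fca, fgn)).1
      = accA ++ pvKeptF l fca.isSome := by
  induction l generalizing accA fca fgn with
  | nil => simp [pvKeptF]
  | cons e t ih =>
    have h3 : ¬ pvTag e == "new token" := by simpa [pvIsNew] using hl e (by simp)
    have ht : ∀ x ∈ t, ¬ pvIsNew x = true := fun x hx => hl x (by simp [hx])
    by_cases hr : pvRelevant e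
    · rw [List.filter_cons_of_pos hr, List.foldl_cons]
      by_cases h1 : pvTag e == "init kv cache"
      · have hA : pvStepA (accA, fca, fgn) e = (accA ++ [e], fca, fgn) := by
          simp [pvStepA]; simp at h1; simp [h1]
        rw [hA, ih ht, pvKeptF]
        simp at h1
        simp [h1]
      · by_cases h2 : pvTag e == "cal atten"
        · cases fca with
          | none =>
            have hA : pvStepA (accA, none, fgn) e = (accA ++ [e], some e, fgn) := by
              simp [pvStepA]; simp at h1 h2; simp [h1, h2]
            rw [hA, ih ht, pvKeptF]
            simp at h1 h2
            simp [h1, h2]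
          | some cc =>
            have hA : pvStepA (accA, some cc, fgn) e = (accA, some cc, fgn) := by
              simp [pvStepA]; simp at h1 h2; simp [h1, h2]
            rw [hA, ih ht, pvKeptF]
            simp at h1 h2
            simp [h1, h2]
        · exfalso
          simp [pvRelevant, h1, h2, h3] at hr
    · rw [List.filter_cons_of_neg hr]
      rw [ih ht, pvKeptF]
      simp [pvRelevant] at hr
      simp [hr]

theorem pv_sel_pick (k : Nat) (hk : 1 ≤ k) (t : List (List String)) (q m : Nat) (hm : m < k) :
    pvSelSpec (↑k) (↑(q * k + m) + 1) t = pvPickMod k ((k - m) % k) t := by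
  induction t generalizing q m with
  | nil => simp [pvSelSpec, pvPickMod]
  | cons e t ih =>
    have hc0 : ((↑(q * k + m) + 1 : Int) == 0) = false := by rw [beq_eq_false_iff_ne]; omega
    have hmod : PySem.Int.mod (↑(q * k + m) + 1 - 1) (↑k) = ↑((q * k + m) % k) := by
      have h : (↑(q * k + m) + 1 - 1 : Int) = ↑(q * k + m) := by ring
      rw [h, PySem.Int.mod_natCast]
    have hmn : (q * k + m) % k = m := by
      rw [Nat.mul_comm, Nat.mul_add_mod]; exact Nat.mod_eq_of_lt hm
    simp only [pvSelSpec, hmod, hmn, hc0, Bool.false_or]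
    by_cases hm0 : m = 0
    · subst hm0
      rw [Nat.sub_zero, Nat.mod_self, pvPickMod, if_pos (by simp)]
      congr 1
      by_cases hk1 : k = 1
      · subst hk1
        have h1 : (↑(q * 1 + 0) + 1 : Int) + 1 = ↑((q + 1) * 1 + 0) + 1 := by push_cast; ring
        rw [h1, ih (q + 1) 0 (by omega)]
      · have h1 : (↑(q * k + 0) + 1 : Int) + 1 = ↑(q * k + 1) + 1 := by push_cast; ring
        rw [h1, ih q 1 (by omega), Nat.mod_eq_of_lt (by omega)]
    · rw [if_neg (by simp [hm0]), Nat.mod_eq_of_lt (by omega)]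
      have hkm : k - m = (k - m - 1) + 1 := by omega
      rw [hkm, pvPickMod]
      by_cases hmk : m + 1 = k
      · subst hmk
        have h1 : (↑(q * (m + 1) + m) + 1 : Int) + 1 = ↑((q + 1) * (m + 1) + 0) + 1 := by
          push_cast; ring
        rw [h1, ih (q + 1) 0 (by omega), Nat.sub_zero, Nat.mod_self]
        have h2 : m + 1 - m - 1 = 0 := by omega
        rw [h2]
      · have h1 : (↑(q * k + m) + 1 : Int) + 1 = ↑(q * k + (m + 1)) + 1 := by push_cast; ring
        rw [h1, ih q (m + 1) (by omega), Nat.mod_eq_of_lt (by omega)]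
        have h2 : k - (m + 1) = k - m - 1 := by omega
        rw [h2]

theorem pv_pick_every (k : Nat) (t : List (List String)) (r : Nat) :
    pvPickMod k r t = pvEveryK k (t.drop r) := by
  induction t generalizing r with
  | nil => cases r <;> simp [pvPickMod, pvEveryK]
  | cons e t ih =>
    cases r with
    | zero => rw [pvPickMod, List.drop_zero, pvEveryK, ih]
    | succ r => rw [pvPickMod, List.drop_succ_cons, ih]

theorem pv_slice_form (k : Nat) (hk : 1 ≤ k) (l : List (List String)) :
    PySem.List.slice? l none none (↑k)
      = some ((List.range ((l.length + k - 1) / k)).filterMap (fun j => l[k * j]?)) := by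
  have hk0 : ¬ ((k : Int) = 0) := by omega
  have hkneg : ¬ ((k : Int) < 0) := by omega
  have hfun : (fun j : Nat => l[((0 : Int) + ↑k * ↑j).toNat]?) = fun j : Nat => l[k * j]? := by
    funext j
    rw [show ((0 : Int) + ↑k * ↑j) = ↑(k * j) by push_cast; ring, Int.toNat_natCast]
  cases l with
  | nil =>
    simp [PySem.List.slice?, PySem.List.sliceIndices, hkneg]
    omega
  | cons x t =>
    have hpos : (0 : Int) < ↑t.length + 1 := by omega
    simp only [PySem.List.slice?, PySem.List.sliceIndices, if_neg hk0, if_neg hkneg,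
      List.length_cons]
    rw [if_pos (show (0:Int) < ↑k by omega), if_pos (show (0:Int) < ↑(t.length + 1) by omega),
      hfun, show ((↑(t.length + 1) - 0 + ↑k - 1) / (↑k:Int)).toNat = (t.length + 1 + k - 1) / k from by
        rw [show (↑(t.length + 1) - 0 + ↑k - 1 : Int) = ↑(t.length + k) from by push_cast; ring,
          ← Int.natCast_div, Int.toNat_natCast]
        congr 1
        omega]

theorem pv_every_form (k : Nat) (hk : 1 ≤ k) :
    ∀ (n : Nat) (t : List (List String)), t.length ≤ n →
      (List.range ((t.length + k - 1) / k)).filterMap (fun j => t[k * j]?) = pvEveryK k t := by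
  intro n
  induction n with
  | zero =>
    intro t ht
    have : t = [] := List.eq_nil_of_length_eq_zero (by omega)
    subst this
    rw [Nat.div_eq_of_lt (by simp; omega)]
    simp [pvEveryK]
  | succ n ih =>
    intro t ht
    cases t with
    | nil =>
      rw [Nat.div_eq_of_lt (by simp; omega)]
      simp [pvEveryK]
    | cons x t =>
      simp only [List.length_cons] at ht
      have hcount : (t.length + 1 + k - 1) / k = t.length / k + 1 := by
        rw [show t.length + 1 + k - 1 = t.length + k by omega, Nat.add_div_right _ (by omega)]
      have hcount2 : t.length / k = ((t.drop (k - 1)).length + k - 1) / k := by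
        rw [List.length_drop]
        by_cases h : k - 1 ≤ t.length
        · congr 1; omega
        · rw [show t.length - (k - 1) = 0 by omega, Nat.div_eq_of_lt (by omega),
            Nat.div_eq_of_lt (by omega)]
      rw [List.length_cons, hcount, List.range_succ_eq_map, List.filterMap_cons]
      have h0 : ((x :: t)[k * 0]?) = some x := by simp
      rw [h0, List.filterMap_map]
      have hfun : ∀ j ∈ List.range (t.length / k),
          ((fun j => (x :: t)[k * j]?) ∘ Nat.succ) j = (t.drop (k - 1))[k * j]? := by
        intro j _
        have hmul : k * (j + 1) = (k - 1 + k * j) + 1 := by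
          rw [Nat.mul_succ]; omega
        simp only [Function.comp_apply, Nat.succ_eq_add_one, hmul,
          List.getElem?_cons_succ, List.getElem?_drop]
      rw [List.filterMap_congr hfun, hcount2,
        ih (t.drop (k - 1)) (by rw [List.length_drop]; omega), pvEveryK]

theorem pv_slice_every (k : Nat) (hk : 1 ≤ k) (t : List (List String)) :
    PySem.List.slice? t none none (↑k) = some (pvEveryK k t) := by
  rw [pv_slice_form k hk t, pv_every_form k hk t.length t (le_refl _)]


-- ===== VERDICT (by name: the statement is the Claim_ definition above) =====
theorem sample_transformer_events_spec : Claim_equal_sample_transformer_events := by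
  intro tes interval _hdom hpre
  show sample_transformer_events tes interval = sample_transformer_events_alt tes interval
  unfold sample_transformer_events sample_transformer_events_alt
  dsimp only
  obtain ⟨hB1, hB2⟩ := pv_b_fold interval tes [] [] false 0
  rw [hB1, hB2]
  simp only [List.nil_append]
  by_cases hemp : tes.isEmpty
  · have : tes = [] := List.isEmpty_iff.mp hemp
    subst this
    simp [PySem.List.sorted, pvKeptF, pvSelSpec]
  · rw [if_neg hemp]
    have hfil : (tes.filter pvRelevant).filter (fun e => pvTag e == "new token")
        = tes.filter pvIsNew := by
      rw [List.filter_filter]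
      apply List.filter_congr
      intro e _
      by_cases h : pvTag e == "new token"
      · simp at h; simp [pvRelevant, pvIsNew, h]
      · simp at h; simp [pvRelevant, pvIsNew, h]
    rw [hfil]
    cases hg : tes.filter pvIsNew with
    | nil =>
      have hnonew : ∀ e ∈ tes, ¬ pvIsNew e = true := List.filter_eq_nil_iff.mp hg
      rw [pv_a_fold_no_new tes hnonew [] none none]
      simp [pvSelSpec]
    | cons g0 grest =>
      have hkept := pv_a_fold tes [] none none
      simp only [List.filter_nil, List.nil_append, Option.isSome_none] at hkept
      rw [hkept]
      have hsel0 : pvSelSpec interval 0 (g0 :: grest) = g0 :: pvSelSpec interval 1 grest := by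
        simp [pvSelSpec]
      rw [hsel0]
      cases grest with
      | nil => simp [pvSelSpec]
      | cons h1 t1 =>
        have hiv : 1 ≤ interval := by
          apply hpre.2
          have hl : (fun e => pvTag e == "new token") = pvIsNew := rfl
          rw [hl, hg]
          simp
        obtain ⟨k, rfl⟩ : ∃ k : Nat, interval = ↑k := ⟨interval.toNat, by omega⟩
        have hk1 : 1 ≤ k := by exact_mod_cast hiv
        have hsel1 : pvSelSpec (↑k) 1 (h1 :: t1) = pvEveryK k (h1 :: t1) := by
          have := pv_sel_pick k hk1 (h1 :: t1) 0 0 (by omega)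
          rw [Nat.sub_zero, Nat.mod_self, pv_pick_every, List.drop_zero] at this
          simpa using this
        dsimp only
        rw [if_neg (by simp), pv_slice_every k hk1 (h1 :: t1), hsel1]
        simp
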